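-- pv_equiv track=rewrite | github.com/vmueller71/code-challenges | robot_attack/solution.py | find_weakest_robot
-- ===== SOURCE A (Python) =====
-- def find_weakest_robot(robots):
--     idx = 0
--     min_armor = 10000
--     for i in range(0, len(robots)):
--         if robots[i] < min_armor and robots[i] > 0:
--             min_armor = robots[i]
--             idx = i
--     return idx
-- ===== SOURCE B (Python) =====
-- def find_weakest_robot(robots):
--     candidates = [a for a in robots if 0 < a < 10000]
--     if not candidates:
--         return 0
--     return robots.index(min(candidates))
-- ===== Notes on version B (the rewrite author's own statement) =====
-- stated objective: simpler
-- what changed: Replaces the index-loop argmin with running (idx, min_armor) state by a filter of qualifying values, min over the filtered list, and a first-occurrence index lookup in the original list.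
import Mathlib
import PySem

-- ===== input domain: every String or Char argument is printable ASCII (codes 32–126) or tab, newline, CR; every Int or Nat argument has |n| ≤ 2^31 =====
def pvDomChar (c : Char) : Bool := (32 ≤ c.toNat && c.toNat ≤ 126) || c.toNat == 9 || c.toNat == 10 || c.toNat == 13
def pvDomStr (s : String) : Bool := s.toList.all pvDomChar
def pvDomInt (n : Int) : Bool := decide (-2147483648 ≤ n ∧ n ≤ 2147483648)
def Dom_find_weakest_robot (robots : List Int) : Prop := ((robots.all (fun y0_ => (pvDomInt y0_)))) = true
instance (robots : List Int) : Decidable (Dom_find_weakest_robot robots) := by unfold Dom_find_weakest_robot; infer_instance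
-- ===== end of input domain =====

-- B replaces A's index-loop argmin (running idx/min_armor state) by filter-min-index?; objective: simpler.

-- ===== PORT A =====
-- loop body of A: 'if robots[i] < min_armor and robots[i] > 0: min_armor = robots[i]; idx = i'
def pvStepA (robots : List Int) (st : Int × Int) (i : Int) : Int × Int :=
  if PySem.List.pyGetD robots i 0 < st.2 ∧ PySem.List.pyGetD robots i 0 > 0 then
    (i, PySem.List.pyGetD robots i 0)
  else st

def find_weakest_robot (robots : List Int) : Int :=
  ((PySem.List.pyRange 0 (PySem.List.len robots) 1).foldl (pvStepA robots) (0, 10000)).1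

-- ===== PORT B =====
def find_weakest_robot_alt (robots : List Int) : Int :=
  let candidates := robots.filter (fun a => 0 < a && a < 10000)
  if candidates.isEmpty then 0
  else
    match PySem.List.min? candidates (fun x => x) with
    | some m =>
      -- robots.index(m): m ∈ robots here, so the ValueError branch is unreachable
      match PySem.List.index? robots m with
      | some j => (j : Int)
      | none => 0
    | none => 0

-- ===== PRECONDITION & SPEC =====
def Spec_find_weakest_robot (robots : List Int) (out : Int) : Prop := out = find_weakest_robot_alt robots
instance (robots : List Int) (out : Int) : Decidable (Spec_find_weakest_robot robots out) := by unfold Spec_find_weakest_robot; infer_instance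

-- ===== CLAIM (what is proved, stated in full; the proofs are below) =====
def Claim_equal_find_weakest_robot : Prop := ∀ (robots : List Int), Dom_find_weakest_robot robots → Spec_find_weakest_robot robots (find_weakest_robot robots)

-- ===== LEMMAS AND PROOFS =====

-- the state A's loop has built after scanning xs
def pvLoopA (xs : List Int) : Int × Int :=
  (PySem.List.pyRange 0 (PySem.List.len xs) 1).foldl (pvStepA xs) (0, 10000)

-- invariant of A's loop: either no element qualifies and the state is untouched,
-- or the state holds the minimum qualifying value together with its first index
def pvInv (xs : List Int) (s : Int × Int) : Prop :=
  (xs.filter (fun a => 0 < a && a < 10000) = [] ∧ s = (0, 10000)) ∨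
  (∃ j : Nat, PySem.List.index? xs s.2 = some j ∧ s.1 = (j : Int) ∧
    (0 < s.2 ∧ s.2 < 10000) ∧
    ∀ y ∈ xs.filter (fun a => 0 < a && a < 10000), s.2 ≤ y)

lemma pvStepA_append (xs : List Int) (x : Int) (st : Int × Int) (i : Int)
    (h0 : 0 ≤ i) (h1 : i < (xs.length : Int)) :
    pvStepA (xs ++ [x]) st i = pvStepA xs st i := by
  have hget : PySem.List.pyGetD (xs ++ [x]) i 0 = PySem.List.pyGetD xs i 0 := by
    have hl : i < ((xs ++ [x]).length : Int) := by
      simp only [List.length_append, List.length_cons, List.length_nil]; push_cast; omega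
    rw [PySem.List.pyGetD_eq_getElem (xs ++ [x]) 0 h0 (by simpa using hl),
        PySem.List.pyGetD_eq_getElem xs 0 h0 h1]
    exact List.getElem_append_left (by omega)
  simp [pvStepA, hget]

lemma pvLoopA_append (xs : List Int) (x : Int) :
    pvLoopA (xs ++ [x]) = pvStepA (xs ++ [x]) (pvLoopA xs) (xs.length : Int) := by
  unfold pvLoopA
  have hlen : PySem.List.len (xs ++ [x]) = (xs.length : Int) + 1 := by
    simp [PySem.List.len_eq]
  rw [hlen, PySem.List.pyRange_one_succ_right (by positivity), List.foldl_append]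
  simp only [List.foldl, PySem.List.len_eq]
  congr 1
  apply PySem.List.foldl_congr_mem
  intro acc i hi
  have h := (PySem.List.mem_pyRange_one).1 hi
  exact pvStepA_append xs x acc i h.1 h.2

lemma pvInv_loopA : ∀ xs : List Int, pvInv xs (pvLoopA xs) := by
  intro xs
  induction xs using List.reverseRecOn with
  | nil =>
    left
    constructor
    · rfl
    · unfold pvLoopA; simp [PySem.List.len_eq]
  | append_singleton xs x ih =>
    rw [pvLoopA_append]
    set s := pvLoopA xs with hs
    have hget : PySem.List.pyGetD (xs ++ [x]) (xs.length : Int) 0 = x := by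
      rw [PySem.List.pyGetD_eq_getElem (xs ++ [x]) 0 (by positivity)
        (by simp only [List.length_append, List.length_cons, List.length_nil]; push_cast; omega)]
      simp
    by_cases hx : x < s.2 ∧ x > 0
    · -- x strictly improves: new state is (len xs, x)
      have hnew : pvStepA (xs ++ [x]) s (xs.length : Int) = ((xs.length : Int), x) := by
        simp [pvStepA, hget, hx]
      rw [hnew]
      have hx10000 : x < 10000 := by
        rcases ih with ⟨hfil, hst⟩ | ⟨j, hidx, hfst, ⟨hpos, hlt⟩, hmin⟩
        · rw [hst] at hx; exact hx.1
        · exact lt_trans hx.1 hlt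
      have hxnotin : x ∉ xs := by
        intro hmemx
        have hxf : x ∈ xs.filter (fun a => 0 < a && a < 10000) := by
          simp [List.mem_filter, hmemx, hx.2, hx10000]
        rcases ih with ⟨hfil, _⟩ | ⟨j, hidx, hfst, ⟨hpos, hlt⟩, hmin⟩
        · simp [hfil] at hxf
        · have := hmin x hxf; omega
      right
      refine ⟨xs.length, ?_, rfl, ⟨hx.2, hx10000⟩, ?_⟩
      · exact PySem.List.index?_append_singleton_self xs x hxnotin
      · intro y hy
        simp only [List.filter_append] at hy
        rcases List.mem_append.1 hy with hy1 | hy2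
        · rcases ih with ⟨hfil, _⟩ | ⟨j, hidx, hfst, ⟨hpos, hlt⟩, hmin⟩
          · simp [hfil] at hy1
          · have := hmin y hy1
            have : s.2 ≤ y := this
            have := hx.1
            show x ≤ y
            omega
        · have : y = x := by
            rcases List.mem_filter.1 hy2 with ⟨hy3, _⟩
            simpa using hy3
          simp [this]
    · -- no improvement: state unchanged
      have hnew : pvStepA (xs ++ [x]) s (xs.length : Int) = s := by
        simp only [pvStepA, hget, if_neg hx]
      rw [hnew]
      rcases ih with ⟨hfil, hst⟩ | ⟨j, hidx, hfst, ⟨hpos, hlt⟩, hmin⟩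
      · -- still nothing qualifies: x fails the test (min_armor is still 10000)
        left
        have hnp : ¬ (0 < x ∧ x < 10000) := by
          rw [hst] at hx; intro h; exact hx ⟨h.2, h.1⟩
        refine ⟨?_, hst⟩
        simp only [List.filter_append, hfil, List.nil_append]
        simp only [List.filter]
        have : (decide (0 < x) && decide (x < 10000)) = false := by
          simp only [Bool.and_eq_false_iff, decide_eq_false_iff_not]
          by_cases h0 : 0 < x
          · right; intro h1; exact hnp ⟨h0, h1⟩
          · left; exact h0
        rw [this]
      · right
        refine ⟨j, ?_, hfst, ⟨hpos, hlt⟩, ?_⟩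
        · have hmem : s.2 ∈ xs := by
            have h := PySem.List.index?_isSome_iff xs s.2
            rw [hidx] at h; simpa using h.1 rfl
          rw [PySem.List.index?_append_of_mem [x] hmem]; exact hidx
        · intro y hy
          simp only [List.filter_append] at hy
          rcases List.mem_append.1 hy with hy1 | hy2
          · exact hmin y hy1
          · have hyx : y = x := by
              rcases List.mem_filter.1 hy2 with ⟨hy3, _⟩
              simpa using hy3
            have hq : 0 < x ∧ x < 10000 := by
              rcases List.mem_filter.1 hy2 with ⟨_, hy4⟩
              rw [hyx] at hy4; simpa using hy4
            subst hyx
            omega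

-- ===== VERDICT (by name: the statement is the Claim_ definition above) =====
theorem find_weakest_robot_spec : Claim_equal_find_weakest_robot := by
  intro robots _
  unfold Spec_find_weakest_robot find_weakest_robot find_weakest_robot_alt
  have hinv := pvInv_loopA robots
  show (pvLoopA robots).1 = _
  rcases hinv with ⟨hfil, hst⟩ | ⟨j, hidx, hfst, ⟨hpos, hlt⟩, hmin⟩
  · simp [hst, hfil]
  · set cand := robots.filter (fun a => 0 < a && a < 10000) with hcand
    have hmem : (pvLoopA robots).2 ∈ robots := by
      have h := PySem.List.index?_isSome_iff robots (pvLoopA robots).2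
      rw [hidx] at h; simpa using h.1 rfl
    have hmemc : (pvLoopA robots).2 ∈ cand := by
      simp [hcand, List.mem_filter, hmem, hpos, hlt]
    have hnil : cand ≠ [] := List.ne_nil_of_mem hmemc
    have hie : cand.isEmpty = false := by simp [hnil]
    rcases hm : PySem.List.min? cand (fun x => x) with _ | m
    · rw [PySem.List.min?_eq_none_iff] at hm
      exact absurd (hm ▸ hmemc) (List.not_mem_nil)
    · have hmmem : m ∈ cand := PySem.List.min?_mem hm
      have h1 : m ≤ (pvLoopA robots).2 := PySem.List.min?_isMin hm _ hmemc
      have h2 : (pvLoopA robots).2 ≤ m := hmin m hmmem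
      have heq : m = (pvLoopA robots).2 := le_antisymm h1 h2
      simp only [hie, Bool.false_eq_true, if_false, hm, heq, hidx, hfst]
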